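-- pv_equiv track=rewrite | github.com/jmparis/advent-of-code | 2025/Day 6 - Trash Compactor/part2.py | find_nonempty_column_ranges
-- ===== SOURCE A (Python) =====
-- def find_nonempty_column_ranges(lines):
--     if not lines:
--         return [], []
--     maxlen = max(len(line) for line in lines)
--     padded = [line.ljust(maxlen) for line in lines]
--     is_separator = [all(row[col] == ' ' for row in padded) for col in range(maxlen)]
--     ranges = []
--     in_range = False
--     start = 0
--     for i, sep in enumerate(is_separator):
--         if not sep and not in_range:
--             in_range = True
--             start = i
--         elif sep and in_range:
--             in_range = False
--             ranges.append((start, i - 1))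
--     if in_range:
--         ranges.append((start, maxlen - 1))
--     return ranges, padded
-- ===== SOURCE B (Python) =====
-- def find_nonempty_column_ranges(lines):
--     if not lines:
--         return [], []
--     maxlen = max(len(line) for line in lines)
--     padded = [line.ljust(maxlen) for line in lines]
--     # per-column emptiness via transpose; ranges by pairing run boundaries
--     nonempty = [any(ch != ' ' for ch in col) for col in zip(*padded)]
--     starts = [i for i, (prev, cur) in enumerate(zip([False] + nonempty, nonempty)) if cur and not prev]
--     ends = [i for i, (cur, nxt) in enumerate(zip(nonempty, nonempty[1:] + [False])) if cur and not nxt]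
--     return list(zip(starts, ends)), padded
-- ===== Notes on version B (the rewrite author's own statement) =====
-- stated objective: alternative
-- what changed: instead of a stateful left-to-right sweep with an in_range flag, B transposes the padded grid with zip(*padded), marks per-column non-emptiness, then detects run starts and run ends independently by comparing each column with its shifted neighbour and pairs the two boundary lists with zip
import Mathlib
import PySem

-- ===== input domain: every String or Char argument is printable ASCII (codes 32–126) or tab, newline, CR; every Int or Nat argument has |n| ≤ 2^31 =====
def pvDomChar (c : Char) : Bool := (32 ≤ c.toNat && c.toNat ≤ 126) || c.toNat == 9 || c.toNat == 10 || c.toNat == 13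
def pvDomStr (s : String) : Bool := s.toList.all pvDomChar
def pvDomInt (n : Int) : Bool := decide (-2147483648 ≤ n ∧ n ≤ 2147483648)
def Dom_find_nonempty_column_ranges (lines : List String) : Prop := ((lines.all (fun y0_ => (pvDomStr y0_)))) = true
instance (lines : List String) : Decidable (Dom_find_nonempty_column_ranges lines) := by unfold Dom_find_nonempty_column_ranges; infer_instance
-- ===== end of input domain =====

-- B replaces A's stateful in_range sweep by a boundary-pairing scheme: transpose the padded
-- grid (zip(*padded)), mark per-column non-emptiness, list run starts and run ends separately
-- by comparing each column with its shifted neighbour, and zip the two lists (objective: alternative).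

-- ===== PORT A =====
-- max(len(line) for line in lines): for Nat lengths, folding max from 0 equals Python's
-- max of the nonempty list (the first element absorbs the initial 0).
def pvMaxlen (lines : List String) : Nat :=
  lines.foldl (fun m l => max m l.toList.length) 0

-- line.ljust(maxlen): pad on the right with spaces to length maxlen (exact; never truncates)
def pvLjust (s : List Char) (n : Nat) : List Char :=
  s ++ List.replicate (n - s.length) ' '

def find_nonempty_column_ranges (lines : List String) : (List (Int × Int)) × List String :=
  if lines = [] then ([], [])
  else
    let maxlen := pvMaxlen lines
    let padded : List (List Char) := lines.map (fun l => pvLjust l.toList maxlen)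
    -- row[col] is in range for every col in range(maxlen) (rows are padded to maxlen),
    -- so pyGetD with any default is exact here
    let is_separator : List Bool :=
      (PySem.List.pyRange 0 (maxlen : Int) 1).map
        (fun col => padded.all (fun row => PySem.List.pyGetD row col ' ' == ' '))
    let st := (PySem.List.enumerate is_separator 0).foldl
      (fun (st : List (Int × Int) × Bool × Int) p =>
        if !p.2 && !st.2.1 then (st.1, true, p.1)
        else if p.2 && st.2.1 then (st.1 ++ [(st.2.2, p.1 - 1)], false, st.2.2)
        else st)
      ([], false, 0)
    let ranges := if st.2.1 then st.1 ++ [(st.2.2, (maxlen : Int) - 1)] else st.1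
    (ranges, padded.map String.ofList)

-- ===== PORT B =====
-- termination measure for pvZipStar (cited by its decreasing_by)
lemma pvZipStar_tail_sum_le (rs : List (List Char)) :
    ((rs.map List.tail).map List.length).sum ≤ (rs.map List.length).sum := by
  induction rs with
  | nil => simp
  | cons r t ih => simp only [List.map_cons, List.sum_cons, List.length_tail]; omega

lemma pvZipStar_dec (rows : List (List Char)) (h : ¬(rows = [] ∨ rows.any List.isEmpty = true)) :
    ((rows.map List.tail).map List.length).sum < (rows.map List.length).sum := by
  rw [not_or] at h
  obtain ⟨h1, h2⟩ := h
  cases rows with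
  | nil => exact absurd rfl h1
  | cons r t =>
    have hr : ¬ r.isEmpty := by
      intro hre
      exact h2 (by simp [List.any_cons, hre])
    have hrlen : 0 < r.length := by
      cases r with
      | nil => simp at hr
      | cons _ _ => simp
    have := pvZipStar_tail_sum_le t
    simp only [List.map_cons, List.sum_cons, List.length_tail]
    omega

-- zip(*rows): truncating transpose; here all rows have equal length
def pvZipStar (rows : List (List Char)) : List (List Char) :=
  if h : rows = [] ∨ rows.any List.isEmpty = true then []
  else (rows.map (fun r => r.headI)) :: pvZipStar (rows.map List.tail)
termination_by ((rows.map List.length).sum)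
decreasing_by simpa using pvZipStar_dec rows h

def find_nonempty_column_ranges_alt (lines : List String) : (List (Int × Int)) × List String :=
  if lines = [] then ([], [])
  else
    let maxlen := pvMaxlen lines
    let padded : List (List Char) := lines.map (fun l => pvLjust l.toList maxlen)
    let nonempty : List Bool :=
      (pvZipStar padded).map (fun col => col.any (fun ch => ch != ' '))
    let starts : List Int :=
      (PySem.List.enumerate (List.zip (false :: nonempty) nonempty) 0).filterMap
        (fun q => if q.2.2 && !q.2.1 then some q.1 else none)
    let ends : List Int :=
      (PySem.List.enumerate (List.zip nonempty (nonempty.drop 1 ++ [false])) 0).filterMap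
        (fun q => if q.2.1 && !q.2.2 then some q.1 else none)
    (List.zip starts ends, padded.map String.ofList)

-- ===== PRECONDITION & SPEC =====
def Spec_find_nonempty_column_ranges (lines : List String) (out : (List (Int × Int)) × List String) : Prop := out = find_nonempty_column_ranges_alt lines
instance (lines : List String) (out : (List (Int × Int)) × List String) : Decidable (Spec_find_nonempty_column_ranges lines out) := by unfold Spec_find_nonempty_column_ranges; infer_instance

-- ===== CLAIM (what is proved, stated in full; the proofs are below) =====
def Claim_equal_find_nonempty_column_ranges : Prop := ∀ (lines : List String), Dom_find_nonempty_column_ranges lines → Spec_find_nonempty_column_ranges lines (find_nonempty_column_ranges lines)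

-- ===== LEMMAS AND PROOFS =====

-- the common "runs" characterisation, over A's separator booleans:
-- runsA i bs = inclusive ranges of maximal non-separator runs of bs, indices starting at i;
-- growA s i bs = the same with a run open since column s (bs starts at index i)
mutual
def runsA : Int → List Bool → List (Int × Int)
  | _, [] => []
  | i, sep :: t => if sep then runsA (i+1) t else growA i (i+1) t
def growA : Int → Int → List Bool → List (Int × Int)
  | s, i, [] => [(s, i-1)]
  | s, i, sep :: t => if sep then (s, i-1) :: runsA (i+1) t else growA s (i+1) t
end

lemma growA_close (s j : Int) (l : List Bool) (h : l.headD true = true) :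
    growA s j l = (s, j-1) :: runsA j l := by
  cases l with
  | nil => simp [growA, runsA]
  | cons x t =>
    simp only [List.headD_cons] at h
    simp [growA, runsA, h]

-- A's fold over enumerate is_separator, with the trailing flush, computes runsA/growA
lemma pv_foldA (bs : List Bool) (i : Int) (r : List (Int × Int)) (b : Bool) (s : Int) :
    (fun st : List (Int × Int) × Bool × Int =>
        if st.2.1 then st.1 ++ [(st.2.2, i + (bs.length : Int) - 1)] else st.1)
      ((PySem.List.enumerate bs i).foldl
        (fun (st : List (Int × Int) × Bool × Int) p =>
          if !p.2 && !st.2.1 then (st.1, true, p.1)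
          else if p.2 && st.2.1 then (st.1 ++ [(st.2.2, p.1 - 1)], false, st.2.2)
          else st)
        (r, b, s))
    = r ++ (if b then growA s i bs else runsA i bs) := by
  induction bs generalizing i r b s with
  | nil =>
    cases b <;> simp [PySem.List.enumerate_nil, growA, runsA]
  | cons sep t ih =>
    rw [PySem.List.enumerate_cons]
    simp only [List.foldl_cons]
    have hlen : i + ((sep :: t).length : Int) - 1 = (i + 1) + (t.length : Int) - 1 := by
      simp only [List.length_cons]; push_cast; ring
    rw [hlen]
    cases sep <;> cases b
    · -- sep = false, not in range: open a run at i
      simpa [runsA] using ih (i+1) r true i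
    · -- sep = false, in range: continue
      simpa [growA] using ih (i+1) r true s
    · -- sep = true, not in range: skip
      simpa [runsA] using ih (i+1) r false s
    · -- sep = true, in range: close the run
      simpa [growA, List.append_assoc] using ih (i+1) (r ++ [(s, i-1)]) false s

-- B's two boundary lists (starts with previous value p prefixed, ends with the shifted-right zip)
def pvStarts (p : Bool) (i : Int) (b : List Bool) : List Int :=
  (PySem.List.enumerate (List.zip (p :: b) b) i).filterMap
    (fun q => if q.2.2 && !q.2.1 then some q.1 else none)

def pvEnds (i : Int) (b : List Bool) : List Int :=
  (PySem.List.enumerate (List.zip b (b.drop 1 ++ [false])) i).filterMap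
    (fun q => if q.2.1 && !q.2.2 then some q.1 else none)

lemma pvStarts_nil (p : Bool) (i : Int) : pvStarts p i [] = [] := by
  simp [pvStarts, PySem.List.enumerate_nil]

lemma pvEnds_nil (i : Int) : pvEnds i [] = [] := by
  simp [pvEnds, PySem.List.enumerate_nil]

lemma pvStarts_cons (p h : Bool) (i : Int) (t : List Bool) :
    pvStarts p i (h :: t) = (if h && !p then [i] else []) ++ pvStarts h (i+1) t := by
  simp only [pvStarts, List.zip_cons_cons, PySem.List.enumerate_cons, List.filterMap_cons]
  cases h <;> cases p <;> simp

lemma pvEnds_cons (i : Int) (h : Bool) (t : List Bool) :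
    pvEnds i (h :: t) = (if h && !(t.headD false) then [i] else []) ++ pvEnds (i+1) t := by
  cases t with
  | nil =>
    simp only [pvEnds, List.drop, List.nil_append, List.zip_cons_cons, List.zip_nil_left,
      PySem.List.enumerate_cons, PySem.List.enumerate_nil, List.filterMap_cons, List.filterMap_nil]
    cases h <;> simp
  | cons h2 t2 =>
    simp only [pvEnds, List.drop, List.cons_append, List.zip_cons_cons,
      PySem.List.enumerate_cons, List.filterMap_cons]
    cases h <;> cases h2 <;> simp

-- pairing the boundary lists yields exactly the runs (simultaneous induction:
-- part 1 = no run pending before index i, part 2 = a run open since s)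
lemma pv_zip_runs (b : List Bool) :
    (∀ (i : Int) (p : Bool), (p = true → b.headD false = false) →
        List.zip (pvStarts p i b) (pvEnds i b) = runsA i (b.map (fun x => !x))) ∧
    (∀ (s i : Int), b.headD false = true →
        List.zip (s :: pvStarts true i b) (pvEnds i b) = growA s i (b.map (fun x => !x))) := by
  induction b with
  | nil =>
    constructor
    · intro i p _; simp [pvStarts_nil, pvEnds_nil, runsA]
    · intro s i h; simp at h
  | cons h t ih =>
    constructor
    · intro i p hp
      rw [pvStarts_cons, pvEnds_cons]
      cases h with
      | false =>
        simp only [Bool.false_and, Bool.false_eq_true, reduceIte, List.nil_append, List.map_cons, Bool.not_false]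
        rw [ih.1 (i+1) false (by simp)]
        simp [runsA]
      | true =>
        have hpf : p = false := by
          cases p
          · rfl
          · exact absurd (hp rfl) (by simp)
        subst hpf
        by_cases hh : t.headD false = true
        · simp only [hh, Bool.not_false, Bool.not_true, Bool.true_and, Bool.and_false,
            Bool.false_eq_true, reduceIte, List.nil_append, List.singleton_append, List.map_cons]
          rw [ih.2 i (i+1) hh]
          simp [runsA]
        · have hh' : t.headD false = false := by simpa using hh
          simp only [hh', Bool.not_false, Bool.true_and, reduceIte,
            List.singleton_append, List.map_cons, List.zip_cons_cons]
          rw [ih.1 (i+1) true (fun _ => hh')]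
          rw [runsA, if_neg (by simp), growA_close i (i+1) (t.map (fun x => !x))
            (by cases t with
                | nil => simp
                | cons x xs =>
                  simp only [List.headD_cons] at hh'
                  simp [hh'])]
          simp
    · intro s i hh
      simp only [List.headD_cons] at hh
      subst hh
      rw [pvStarts_cons, pvEnds_cons]
      by_cases hh2 : t.headD false = true
      · simp only [hh2, Bool.not_true, Bool.and_false, Bool.false_eq_true, reduceIte,
          List.nil_append, List.map_cons]
        rw [ih.2 s (i+1) hh2]
        simp [growA]
      · have hh2' : t.headD false = false := by simpa using hh2
        simp only [hh2', Bool.not_true, Bool.not_false, Bool.true_and, Bool.and_false,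
          Bool.false_eq_true, reduceIte, List.nil_append, List.singleton_append, List.map_cons,
          List.zip_cons_cons]
        rw [ih.1 (i+1) true (fun _ => hh2')]
        rw [growA, if_neg (by simp), growA_close s (i+1) (t.map (fun x => !x))
          (by cases t with
              | nil => simp
              | cons x xs =>
                simp only [List.headD_cons] at hh2'
                simp [hh2'])]
        simp

-- all over a list only depends on the predicate's values on members
lemma pv_all_congr {α : Type} (l : List α) (p q : α → Bool) (h : ∀ x ∈ l, p x = q x) :
    l.all p = l.all q := by
  induction l with
  | nil => rfl
  | cons x t ih =>
    simp only [List.all_cons, h x (by simp), ih (fun y hy => h y (by simp [hy]))]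

-- every padded row has length maxlen
lemma pv_padded_len (lines : List String) (row : List Char)
    (hrow : row ∈ lines.map (fun l => pvLjust l.toList (pvMaxlen lines))) :
    row.length = pvMaxlen lines := by
  obtain ⟨l, hl, rfl⟩ := List.mem_map.mp hrow
  have := (PySem.List.le_foldl_max_nat lines (fun l => l.toList.length) 0).2 l hl
  simp [pvLjust, pvMaxlen] at this ⊢
  omega

-- the transpose-based nonempty list is the elementwise negation of A's is_separator list
lemma pv_zipstar_neg (n : Nat) (rows : List (List Char)) (hne : rows ≠ [])
    (hlen : ∀ r ∈ rows, r.length = n) :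
    (pvZipStar rows).map (fun col => col.any (fun ch => ch != ' '))
    = ((PySem.List.pyRange 0 (n : Int) 1).map
        (fun col => rows.all (fun row => PySem.List.pyGetD row col ' ' == ' '))).map
        (fun x => !x) := by
  induction n generalizing rows with
  | zero =>
    have hz : pvZipStar rows = [] := by
      rw [pvZipStar]
      cases rows with
      | nil => simp
      | cons r t =>
        have : r.isEmpty := by
          have := hlen r (by simp)
          cases r <;> simp_all
        simp [List.any_cons, this]
    simp [hz]
  | succ m ih =>
    have hnonempty : ∀ r ∈ rows, r ≠ [] := by
      intro r hr hcon
      have := hlen r hr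
      simp [hcon] at this
    have hcond : ¬ (rows = [] ∨ rows.any List.isEmpty = true) := by
      rintro (rfl | hany)
      · exact hne rfl
      · rw [List.any_eq_true] at hany
        obtain ⟨r, hr, hre⟩ := hany
        have := hnonempty r hr
        cases r <;> simp_all
    have hz : pvZipStar rows
        = (rows.map (fun r => r.headI)) :: pvZipStar (rows.map List.tail) := by
      rw [pvZipStar, dif_neg hcond]
    rw [hz]
    have hcons : PySem.List.pyRange 0 ((m+1 : Nat) : Int) 1
        = 0 :: PySem.List.pyRange 1 ((m+1 : Nat) : Int) 1 := by
      exact PySem.List.pyRange_one_cons (by omega)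
    rw [hcons]
    simp only [List.map_cons]
    congr 1
    · -- heads: any over heads = negation of all over column 0
      rw [List.any_map]
      have h0 : ∀ r ∈ rows, PySem.List.pyGetD r (0 : Int) ' ' = r.headI := by
        intro r hr
        have hr' := hnonempty r hr
        cases r with
        | nil => exact absurd rfl hr'
        | cons c cs =>
          rw [show ((0 : Int)) = ((0 : Nat) : Int) by norm_num, PySem.List.pyGetD_natCast]
          simp
      rw [pv_all_congr rows _ _ (fun r hr => by rw [h0 r hr])]
      cases hall : rows.all (fun r => r.headI == ' ')
      · simp only [Bool.not_false]
        rw [List.all_eq_false] at hall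
        obtain ⟨r, hr, hrne⟩ := hall
        rw [List.any_eq_true]
        exact ⟨r, hr, by simpa using hrne⟩
      · simp only [Bool.not_true]
        rw [List.any_eq_false]
        intro r hr
        rw [List.all_eq_true] at hall
        simpa using hall r hr
    · -- tails: shift indices by one and apply the induction hypothesis
      have htail : ∀ r ∈ rows.map List.tail, r.length = m := by
        intro r hr
        obtain ⟨r0, hr0, rfl⟩ := List.mem_map.mp hr
        have := hlen r0 hr0
        simp [List.length_tail, this]
      have hne' : rows.map List.tail ≠ [] := by
        cases rows
        · exact absurd rfl hne
        · simp
      rw [ih (rows.map List.tail) hne' htail]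
      -- both sides are maps of negation over an all-column test; compare the pyRange maps
      congr 1
      rw [PySem.List.pyRange_one ((0 : Int)) ((m : Nat) : Int),
          PySem.List.pyRange_one ((1 : Int)) ((m+1 : Nat) : Int)]
      have hm : (((m : Nat) : Int) - 0).toNat = m := by omega
      have hm1 : (((m+1 : Nat) : Int) - 1).toNat = m := by push_cast; omega
      rw [hm, hm1]
      rw [List.map_map, List.map_map]
      refine List.map_congr_left ?_
      intro k hk
      rw [List.mem_range] at hk
      simp only [Function.comp]
      rw [List.all_map]
      refine pv_all_congr rows _ _ ?_
      intro r hr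
      have hr' := hnonempty r hr
      have hrl := hlen r hr
      cases r with
      | nil => exact absurd rfl hr'
      | cons c cs =>
        simp only [Function.comp, List.tail_cons]
        have h1 : (1 : Int) + (k : Int) = ((k + 1 : Nat) : Int) := by push_cast; ring
        have h2 : (0 : Int) + (k : Int) = ((k : Nat) : Int) := by push_cast; ring
        rw [h1, h2, PySem.List.pyGetD_natCast, PySem.List.pyGetD_natCast]
        simp [List.getD]

lemma pv_main (lines : List String) :
    find_nonempty_column_ranges lines = find_nonempty_column_ranges_alt lines := by
  by_cases hl : lines = []
  · simp [find_nonempty_column_ranges, find_nonempty_column_ranges_alt, hl]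
  · simp only [find_nonempty_column_ranges, find_nonempty_column_ranges_alt, if_neg hl]
    set n := pvMaxlen lines with hn
    set padded := lines.map (fun l => pvLjust l.toList n) with hpad
    set S : List Bool :=
      (PySem.List.pyRange 0 (n : Int) 1).map
        (fun col => padded.all (fun row => PySem.List.pyGetD row col ' ' == ' ')) with hS
    set N : List Bool := (pvZipStar padded).map (fun col => col.any (fun ch => ch != ' ')) with hN
    have hpadne : padded ≠ [] := by
      cases lines
      · exact absurd rfl hl
      · simp [hpad]
    have hNS : N = S.map (fun x => !x) :=
      pv_zipstar_neg n padded hpadne (fun r hr => pv_padded_len lines r hr)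
    have hSlen : (S.length : Int) = (n : Int) := by
      simp [hS, PySem.List.length_pyRange_one]
    -- A side: fold = runsA 0 S
    have hA := pv_foldA S 0 [] false 0
    simp only [zero_add, List.nil_append, if_neg (by simp : ¬ false = true)] at hA
    -- B side: zip of boundary lists = runsA 0 (N.map not) = runsA 0 S
    have hB := (pv_zip_runs N).1 0 false (by simp)
    have hNots : N.map (fun x => !x) = S := by
      rw [hNS, List.map_map]
      simp [Function.comp_def]
    rw [hNots] at hB
    refine Prod.ext ?_ rfl
    rw [show ((n : Int) - 1) = (S.length : Int) - 1 by omega]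
    exact hA.trans hB.symm

-- ===== VERDICT (by name: the statement is the Claim_ definition above) =====
theorem find_nonempty_column_ranges_spec : Claim_equal_find_nonempty_column_ranges := by
  intro lines _
  unfold Spec_find_nonempty_column_ranges
  exact pv_main lines
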